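-- pv_equiv track=rewrite | github.com/UltiRequiem/google-kick-start | 2022/hex.py | process
-- ===== SOURCE A (Python) =====
-- VALID_INPUTS = ["B", "R", "."]
--
-- def process(data: list[list[str]], size: int):
--     if any(len(data) != size for data in data):
--         return "Impossible"
--
--     flatten = [char for row in data for char in row]
--
--     if any(char not in VALID_INPUTS for char in set(flatten)):
--         return "Impossible"
--
--     b_apparitions, r_apparitions, dot_apparitions = [
--         flatten.count(char) for char in VALID_INPUTS
--     ]
--
--     if size > 1 and (
--         (b_apparitions + dot_apparitions < r_apparitions)
--         or (r_apparitions + dot_apparitions < b_apparitions)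
--     ):
--         return "Impossible"
--
--     blue_wins = []
--     red_wins = []
--
--     for column in range(len(data)):
--         blue_wins.append(all(char == "B" for char in data[column]))
--         red_wins.append(all(char == "R" for char in data[column]))
--
--         column_data = [row[column] for row in data]
--
--         blue_wins.append(all(char == "B" for char in column_data))
--         red_wins.append(all(char == "R" for char in column_data))
--
--     b_wins_count, r_wins_count = sum(blue_wins), sum(red_wins)
--
--     if size > 2 and (b_wins_count > 1 or r_wins_count > 1):
--         return "Impossible"
--
--     if b_wins_count or r_wins_count:
--         return "Blue wins" if b_wins_count else "Red wins"
--
--     return "Nobody wins"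
-- ===== SOURCE B (Python) =====
-- def process(data, size):
--     n = len(data)
--     cb = cr = cd = 0
--     col_b = [0] * n
--     col_r = [0] * n
--     ok = True
--     b_wins = r_wins = 0
--     for row in data:
--         if len(row) != size:
--             return "Impossible"
--         rb = rr = 0
--         for j, cell in enumerate(row):
--             if cell == "B":
--                 cb += 1
--                 rb += 1
--                 if j < n:
--                     col_b[j] += 1
--             elif cell == "R":
--                 cr += 1
--                 rr += 1
--                 if j < n:
--                     col_r[j] += 1
--             elif cell == ".":
--                 cd += 1
--             else:
--                 ok = False
--         if rb == size:
--             b_wins += 1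
--         if rr == size:
--             r_wins += 1
--     if not ok:
--         return "Impossible"
--     if size > 1 and (cb + cd < cr or cr + cd < cb):
--         return "Impossible"
--     b_wins += sum(1 for c in col_b if c == n)
--     r_wins += sum(1 for c in col_r if c == n)
--     if size > 2 and (b_wins > 1 or r_wins > 1):
--         return "Impossible"
--     if b_wins or r_wins:
--         return "Blue wins" if b_wins else "Red wins"
--     return "Nobody wins"
-- ===== Notes on version B (the rewrite author's own statement) =====
-- stated objective: alternative
-- what changed: A scans the whole grid repeatedly (a set-based validity pass, three flatten.count passes, and a per-column pass that rebuilds each column list with a nested comprehension); B makes one pass over the rows maintaining global colour counts, a validity flag, per-row counts and per-column counters, then reads the winner counts off the counter tables with the same guards in the same order.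
import Mathlib
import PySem

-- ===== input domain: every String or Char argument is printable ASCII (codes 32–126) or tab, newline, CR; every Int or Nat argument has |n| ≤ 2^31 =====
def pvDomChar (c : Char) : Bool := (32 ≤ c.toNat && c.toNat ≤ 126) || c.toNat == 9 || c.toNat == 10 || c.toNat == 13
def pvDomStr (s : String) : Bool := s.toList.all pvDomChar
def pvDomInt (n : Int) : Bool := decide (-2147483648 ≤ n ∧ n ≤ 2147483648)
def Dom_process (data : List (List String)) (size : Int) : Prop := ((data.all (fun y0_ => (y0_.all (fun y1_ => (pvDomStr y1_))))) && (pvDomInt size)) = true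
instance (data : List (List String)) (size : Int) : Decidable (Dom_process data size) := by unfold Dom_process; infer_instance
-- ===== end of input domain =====

-- B replaces A's repeated whole-grid passes (three flatten.count calls and a per-column
-- rebuild of each column list) by a single pass over the rows that maintains colour counters
-- per row and per column; the guards and the answer order are unchanged. Objective: alternative.

-- ===== PORT A =====
def VALID_INPUTS : List String := ["B", "R", "."]

def process (data : List (List String)) (size : Int) : String :=
  if data.any (fun row => (row.length : Int) != size) then "Impossible"
  else
    let flatten := data.flatMap (fun row => row)
    if (PySem.Set.ofList flatten).any (fun c => !(VALID_INPUTS.contains c)) then "Impossible"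
    else
      let b_apparitions := flatten.count "B"
      let r_apparitions := flatten.count "R"
      let dot_apparitions := flatten.count "."
      if size > 1 ∧ (b_apparitions + dot_apparitions < r_apparitions ∨
                     r_apparitions + dot_apparitions < b_apparitions) then "Impossible"
      else
        let wins := (List.range data.length).foldl (fun (acc : List Bool × List Bool) column =>
          let rowd := data.getD column []
          -- row[column]: Python raises IndexError when column ≥ len(row); those inputs are
          -- exactly Raises_process and lie outside Pre_process, so the "" default is never hit.
          let columnData := data.map (fun row => PySem.List.pyGetD row (column : Int) "")
          (acc.1 ++ [rowd.all (· == "B"), columnData.all (· == "B")],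
           acc.2 ++ [rowd.all (· == "R"), columnData.all (· == "R")])) ([], [])
        let b_wins_count := wins.1.count true
        let r_wins_count := wins.2.count true
        if size > 2 ∧ (b_wins_count > 1 ∨ r_wins_count > 1) then "Impossible"
        else if b_wins_count ≠ 0 ∨ r_wins_count ≠ 0 then
          (if b_wins_count ≠ 0 then "Blue wins" else "Red wins")
        else "Nobody wins"

-- ===== PORT B =====
structure HexSt where
  cb : Nat
  cr : Nat
  cd : Nat
  colB : List Nat
  colR : List Nat
  ok : Bool
  bw : Nat
  rw : Nat
deriving Repr, DecidableEq

-- inner loop of Source B: 'for j, cell in enumerate(row)', carrying (st, rb, rr)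
def hexCells (n : Nat) : List String → Nat → HexSt × Nat × Nat → HexSt × Nat × Nat
  | [], _, acc => acc
  | cell :: rest, j, (st, rb, rr) =>
    hexCells n rest (j + 1) <|
      if cell = "B" then
        ({ st with cb := st.cb + 1, colB := if j < n then st.colB.modify j (· + 1) else st.colB }, rb + 1, rr)
      else if cell = "R" then
        ({ st with cr := st.cr + 1, colR := if j < n then st.colR.modify j (· + 1) else st.colR }, rb, rr + 1)
      else if cell = "." then
        ({ st with cd := st.cd + 1 }, rb, rr)
      else
        ({ st with ok := false }, rb, rr)

-- outer loop of Source B: 'for row in data'; none = the early 'return "Impossible"'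
def hexRows (size : Int) (n : Nat) : List (List String) → HexSt → Option HexSt
  | [], st => some st
  | row :: rest, st =>
    if (row.length : Int) = size then
      match hexCells n row 0 (st, 0, 0) with
      | (st', rb, rr) =>
        hexRows size n rest { st' with
          bw := if (rb : Int) = size then st'.bw + 1 else st'.bw,
          rw := if (rr : Int) = size then st'.rw + 1 else st'.rw }
    else none

def process_alt (data : List (List String)) (size : Int) : String :=
  let n := data.length
  match hexRows size n data ⟨0, 0, 0, List.replicate n 0, List.replicate n 0, true, 0, 0⟩ with
  | none => "Impossible"
  | some st =>
    if st.ok = false then "Impossible"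
    else if size > 1 ∧ (st.cb + st.cd < st.cr ∨ st.cr + st.cd < st.cb) then "Impossible"
    else
      let b_wins := st.bw + st.colB.count n
      let r_wins := st.rw + st.colR.count n
      if size > 2 ∧ (b_wins > 1 ∨ r_wins > 1) then "Impossible"
      else if b_wins ≠ 0 ∨ r_wins ≠ 0 then (if b_wins ≠ 0 then "Blue wins" else "Red wins")
      else "Nobody wins"

-- ===== PRECONDITION & SPEC =====
-- Pre_ excludes exactly the inputs on which the Python A raises IndexError (nothing A returns
-- on): a non-empty board with more rows than `size` whose rows all have length `size`, all
-- cells in {B, R, .} and the size>1 balance guard not firing — there A's column scan evaluates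
-- row[column] with column ≥ len(row).
def Pre_process (data : List (List String)) (size : Int) : Prop :=
  ¬(data ≠ [] ∧ (∀ row ∈ data, (row.length : Int) = size) ∧ (data.length : Int) > size ∧
    (∀ row ∈ data, ∀ c ∈ row, c = "B" ∨ c = "R" ∨ c = ".") ∧
    ¬(size > 1 ∧
       ((data.flatMap (fun r => r)).count "B" + (data.flatMap (fun r => r)).count "." <
          (data.flatMap (fun r => r)).count "R" ∨
        (data.flatMap (fun r => r)).count "R" + (data.flatMap (fun r => r)).count "." <
          (data.flatMap (fun r => r)).count "B")))
instance (data : List (List String)) (size : Int) : Decidable (Pre_process data size) := by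
  unfold Pre_process; infer_instance

def pvWitness_process : List (List String) × Int := ([["B", "R"], ["R", "B"]], 2)

def Spec_process (data : List (List String)) (size : Int) (out : String) : Prop := out = process_alt data size
instance (data : List (List String)) (size : Int) (out : String) : Decidable (Spec_process data size out) := by unfold Spec_process; infer_instance

-- ===== CLAIM (what is proved, stated in full; the proofs are below) =====
def Claim_equal_process : Prop := ∀ (data : List (List String)) (size : Int), Dom_process data size → Pre_process data size → Spec_process data size (process data size)

-- ===== LEMMAS AND PROOFS =====

-- per-row column contribution at column k when the row's cells start at index j0
def colCnt (v : String) (row : List String) (j0 k : Nat) : Nat :=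
  if j0 ≤ k ∧ row[k - j0]? = some v then 1 else 0

def validCell (c : String) : Bool := c == "B" || c == "R" || c == "."

theorem colCnt_shift (v cell : String) (rest : List String) (j0 k : Nat) (h : k ≠ j0) :
    colCnt v (cell :: rest) j0 k = colCnt v rest (j0 + 1) k := by
  unfold colCnt
  rcases Nat.lt_or_ge j0 k with hlt | hge
  · have h1 : k - j0 = (k - (j0 + 1)) + 1 := by omega
    rw [h1]
    simp only [List.getElem?_cons_succ]
    have : (j0 ≤ k) = True := by simp [Nat.le_of_lt hlt]
    have h2 : (j0 + 1 ≤ k) = True := by simp [hlt]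
    simp [this, h2]
  · have h1 : ¬ j0 ≤ k := by omega
    have h2 : ¬ j0 + 1 ≤ k := by omega
    simp [h1, h2]

theorem colCnt_cons_ne (v cell : String) (rest : List String) (j0 k : Nat) (h : cell ≠ v) :
    colCnt v (cell :: rest) j0 k = colCnt v rest (j0 + 1) k := by
  by_cases hk : k = j0
  · subst hk
    simp [colCnt, h]
  · exact colCnt_shift v cell rest j0 k hk

theorem hexCells_spec (n : Nat) (row : List String) : ∀ (j0 : Nat) (st : HexSt) (rb rr : Nat),
    (hexCells n row j0 (st, rb, rr)).2.1 = rb + row.count "B" ∧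
    (hexCells n row j0 (st, rb, rr)).2.2 = rr + row.count "R" ∧
    (hexCells n row j0 (st, rb, rr)).1.cb = st.cb + row.count "B" ∧
    (hexCells n row j0 (st, rb, rr)).1.cr = st.cr + row.count "R" ∧
    (hexCells n row j0 (st, rb, rr)).1.cd = st.cd + row.count "." ∧
    (hexCells n row j0 (st, rb, rr)).1.ok = (st.ok && row.all validCell) ∧
    (hexCells n row j0 (st, rb, rr)).1.bw = st.bw ∧
    (hexCells n row j0 (st, rb, rr)).1.rw = st.rw ∧
    (hexCells n row j0 (st, rb, rr)).1.colB.length = st.colB.length ∧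
    (hexCells n row j0 (st, rb, rr)).1.colR.length = st.colR.length ∧
    (st.colB.length ≤ n → ∀ k : Nat, ((hexCells n row j0 (st, rb, rr)).1.colB)[k]? =
        (· + colCnt "B" row j0 k) <$> st.colB[k]?) ∧
    (st.colR.length ≤ n → ∀ k : Nat, ((hexCells n row j0 (st, rb, rr)).1.colR)[k]? =
        (· + colCnt "R" row j0 k) <$> st.colR[k]?) := by
  induction row with
  | nil =>
    intro j0 st rb rr
    refine ⟨rfl, rfl, ?_, ?_, ?_, ?_, rfl, rfl, rfl, rfl, ?_, ?_⟩ <;>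
      · simp [hexCells, colCnt]
  | cons cell rest ih =>
    intro j0 st rb rr
    by_cases hB : cell = "B"
    · subst hB
      have hstep : hexCells n ("B" :: rest) j0 (st, rb, rr) =
          hexCells n rest (j0 + 1)
            (({ st with cb := st.cb + 1, colB := if j0 < n then st.colB.modify j0 (· + 1) else st.colB } : HexSt), rb + 1, rr) := by
        simp [hexCells]
      obtain ⟨i1, i2, i3, i4, i5, i6, i7, i8, i9, i10, i11, i12⟩ := ih (j0 + 1)
        ({ st with cb := st.cb + 1, colB := if j0 < n then st.colB.modify j0 (· + 1) else st.colB }) (rb + 1) rr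
      rw [hstep]
      refine ⟨?_, ?_, ?_, ?_, ?_, ?_, ?_, ?_, ?_, ?_, ?_, ?_⟩
      · rw [i1]; simp [List.count_cons]; omega
      · rw [i2]; simp [List.count_cons]
      · rw [i3]; simp [List.count_cons]; omega
      · rw [i4]; simp [List.count_cons]
      · rw [i5]; simp [List.count_cons]
      · rw [i6]; simp [validCell]
      · rw [i7]
      · rw [i8]
      · rw [i9]; by_cases hn : j0 < n <;> simp [hn, List.length_modify]
      · rw [i10]
      · intro hlen k
        have hlen' : (if j0 < n then st.colB.modify j0 (· + 1) else st.colB).length ≤ n := by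
          by_cases hn : j0 < n <;> simpa [hn, List.length_modify] using hlen
        rw [i11 hlen' k]
        by_cases hk : k = j0
        · subst hk
          by_cases hn : k < n
          · simp only [if_pos hn, List.getElem?_modify]
            cases st.colB[k]? <;> simp [colCnt]
          · have hnone : st.colB[k]? = none := List.getElem?_eq_none (by omega)
            simp [hnone, hn]
        · rw [colCnt_shift "B" "B" rest j0 k hk]
          by_cases hn : j0 < n
          · simp only [if_pos hn, List.getElem?_modify]
            cases st.colB[k]? <;> simp [Ne.symm hk]
          · simp [hn]
      · intro hlen k
        rw [i12 hlen k, colCnt_cons_ne "R" "B" rest j0 k (by decide)]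
    · by_cases hR : cell = "R"
      · subst hR
        have hstep : hexCells n ("R" :: rest) j0 (st, rb, rr) =
            hexCells n rest (j0 + 1)
              (({ st with cr := st.cr + 1, colR := if j0 < n then st.colR.modify j0 (· + 1) else st.colR } : HexSt), rb, rr + 1) := by
          simp [hexCells]
        obtain ⟨i1, i2, i3, i4, i5, i6, i7, i8, i9, i10, i11, i12⟩ := ih (j0 + 1)
          ({ st with cr := st.cr + 1, colR := if j0 < n then st.colR.modify j0 (· + 1) else st.colR }) rb (rr + 1)
        rw [hstep]
        refine ⟨?_, ?_, ?_, ?_, ?_, ?_, ?_, ?_, ?_, ?_, ?_, ?_⟩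
        · rw [i1]; simp [List.count_cons]
        · rw [i2]; simp [List.count_cons]; omega
        · rw [i3]; simp [List.count_cons]
        · rw [i4]; simp [List.count_cons]; omega
        · rw [i5]; simp [List.count_cons]
        · rw [i6]; simp [validCell]
        · rw [i7]
        · rw [i8]
        · rw [i9]
        · rw [i10]; by_cases hn : j0 < n <;> simp [hn, List.length_modify]
        · intro hlen k
          rw [i11 hlen k, colCnt_cons_ne "B" "R" rest j0 k (by decide)]
        · intro hlen k
          have hlen' : (if j0 < n then st.colR.modify j0 (· + 1) else st.colR).length ≤ n := by
            by_cases hn : j0 < n <;> simpa [hn, List.length_modify] using hlen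
          rw [i12 hlen' k]
          by_cases hk : k = j0
          · subst hk
            by_cases hn : k < n
            · simp only [if_pos hn, List.getElem?_modify]
              cases st.colR[k]? <;> simp [colCnt]
            · have hnone : st.colR[k]? = none := List.getElem?_eq_none (by omega)
              simp [hnone, hn]
          · rw [colCnt_shift "R" "R" rest j0 k hk]
            by_cases hn : j0 < n
            · simp only [if_pos hn, List.getElem?_modify]
              cases st.colR[k]? <;> simp [Ne.symm hk]
            · simp [hn]
      · by_cases hD : cell = "."
        · subst hD
          have hstep : hexCells n ("." :: rest) j0 (st, rb, rr) =
              hexCells n rest (j0 + 1) (({ st with cd := st.cd + 1 } : HexSt), rb, rr) := by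
            simp [hexCells]
          obtain ⟨i1, i2, i3, i4, i5, i6, i7, i8, i9, i10, i11, i12⟩ := ih (j0 + 1)
            ({ st with cd := st.cd + 1 }) rb rr
          rw [hstep]
          refine ⟨?_, ?_, ?_, ?_, ?_, ?_, ?_, ?_, ?_, ?_, ?_, ?_⟩
          · rw [i1]; simp [List.count_cons]
          · rw [i2]; simp [List.count_cons]
          · rw [i3]; simp [List.count_cons]
          · rw [i4]; simp [List.count_cons]
          · rw [i5]; simp [List.count_cons]; omega
          · rw [i6]; simp [validCell]
          · rw [i7]
          · rw [i8]
          · rw [i9]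
          · rw [i10]
          · intro hlen k
            rw [i11 hlen k, colCnt_cons_ne "B" "." rest j0 k (by decide)]
          · intro hlen k
            rw [i12 hlen k, colCnt_cons_ne "R" "." rest j0 k (by decide)]
        · have hstep : hexCells n (cell :: rest) j0 (st, rb, rr) =
              hexCells n rest (j0 + 1) (({ st with ok := false } : HexSt), rb, rr) := by
            simp [hexCells, hB, hR, hD]
          obtain ⟨i1, i2, i3, i4, i5, i6, i7, i8, i9, i10, i11, i12⟩ := ih (j0 + 1)
            ({ st with ok := false }) rb rr
          rw [hstep]
          refine ⟨?_, ?_, ?_, ?_, ?_, ?_, ?_, ?_, ?_, ?_, ?_, ?_⟩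
          · rw [i1]; simp [List.count_cons, hB]
          · rw [i2]; simp [List.count_cons, hR]
          · rw [i3]; simp [List.count_cons, hB]
          · rw [i4]; simp [List.count_cons, hR]
          · rw [i5]; simp [List.count_cons, hD]
          · rw [i6]; simp [validCell, hB, hR, hD]
          · rw [i7]
          · rw [i8]
          · rw [i9]
          · rw [i10]
          · intro hlen k
            rw [i11 hlen k, colCnt_cons_ne "B" cell rest j0 k hB]
          · intro hlen k
            rw [i12 hlen k, colCnt_cons_ne "R" cell rest j0 k hR]

theorem hexRows_none (size : Int) (n : Nat) (rows : List (List String)) :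
    ∀ st, (∃ row ∈ rows, (row.length : Int) ≠ size) → hexRows size n rows st = none := by
  induction rows with
  | nil => rintro st ⟨r, hr, _⟩; exact absurd hr (List.not_mem_nil)
  | cons row rest ih =>
    rintro st ⟨r, hr, hne⟩
    by_cases h : (row.length : Int) = size
    · have hr' : r ∈ rest := by
        rcases List.mem_cons.mp hr with h1 | h1
        · exact absurd h (h1 ▸ hne)
        · exact h1
      rcases hmid : hexCells n row 0 (st, 0, 0) with ⟨stM, rbM, rrM⟩
      simp only [hexRows, if_pos h, hmid]
      exact ih _ ⟨r, hr', hne⟩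
    · simp [hexRows, h]

theorem hexRows_spec (size : Int) (n : Nat) (rows : List (List String))
    (h : ∀ row ∈ rows, (row.length : Int) = size) : ∀ st, ∃ st',
    hexRows size n rows st = some st' ∧
    st'.cb = st.cb + (rows.map (fun r => r.count "B")).sum ∧
    st'.cr = st.cr + (rows.map (fun r => r.count "R")).sum ∧
    st'.cd = st.cd + (rows.map (fun r => r.count ".")).sum ∧
    st'.ok = (st.ok && rows.all (fun row => row.all validCell)) ∧
    st'.bw = st.bw + rows.countP (fun row => (row.count "B" : Int) == size) ∧
    st'.rw = st.rw + rows.countP (fun row => (row.count "R" : Int) == size) ∧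
    st'.colB.length = st.colB.length ∧
    st'.colR.length = st.colR.length ∧
    (st.colB.length ≤ n → ∀ k : Nat, st'.colB[k]? =
        (· + rows.countP (fun (row : List String) => row[k]? == some "B")) <$> st.colB[k]?) ∧
    (st.colR.length ≤ n → ∀ k : Nat, st'.colR[k]? =
        (· + rows.countP (fun (row : List String) => row[k]? == some "R")) <$> st.colR[k]?) := by
  induction rows with
  | nil =>
    intro st
    refine ⟨st, rfl, by simp, by simp, by simp, by simp, by simp, by simp, rfl, rfl, ?_, ?_⟩ <;>
      · intro _ k; cases st.colB[k]? <;> cases st.colR[k]? <;> simp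
  | cons row rest ih =>
    have hrow : (row.length : Int) = size := h row (List.mem_cons_self)
    have hrest : ∀ r ∈ rest, (r.length : Int) = size := fun r hr => h r (List.mem_cons_of_mem _ hr)
    intro st
    obtain ⟨c1, c2, c3, c4, c5, c6, c7, c8, c9, c10, c11, c12⟩ := hexCells_spec n row 0 st 0 0
    rcases hmid : hexCells n row 0 (st, 0, 0) with ⟨stM, rbM, rrM⟩
    rw [hmid] at c1 c2 c3 c4 c5 c6 c7 c8 c9 c10 c11 c12
    dsimp only at c1 c2 c3 c4 c5 c6 c7 c8 c9 c10 c11 c12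
    obtain ⟨st', hrun, e1, e2, e3, e4, e5, e6, e7, e8, e9, e10⟩ := (ih hrest)
      ({ stM with bw := if (rbM : Int) = size then stM.bw + 1 else stM.bw,
                  rw := if (rrM : Int) = size then stM.rw + 1 else stM.rw })
    refine ⟨st', ?_, ?_, ?_, ?_, ?_, ?_, ?_, ?_, ?_, ?_, ?_⟩
    · simp only [hexRows, if_pos hrow, hmid]
      exact hrun
    · rw [e1]; dsimp only; rw [c3]; simp; omega
    · rw [e2]; dsimp only; rw [c4]; simp; omega
    · rw [e3]; dsimp only; rw [c5]; simp; omega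
    · rw [e4]; dsimp only; rw [c6]; simp [Bool.and_assoc]
    · rw [e5]; dsimp only; rw [c1, c7]
      by_cases hw : (row.count "B" : Int) = size <;>
        simp [List.countP_cons, hw] <;> omega
    · rw [e6]; dsimp only; rw [c2, c8]
      by_cases hw : (row.count "R" : Int) = size <;>
        simp [List.countP_cons, hw] <;> omega
    · rw [e7]; dsimp only; exact c9
    · rw [e8]; dsimp only; exact c10
    · intro hlen k
      have hlen1 : stM.colB.length ≤ n := by rw [c9]; exact hlen
      rw [e9 hlen1 k]; dsimp only; rw [c11 hlen k]
      cases st.colB[k]? with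
      | none => simp
      | some a =>
        by_cases hv : row[k]? = some "B" <;>
          simp [colCnt, hv, List.countP_cons] <;> omega
    · intro hlen k
      have hlen1 : stM.colR.length ≤ n := by rw [c10]; exact hlen
      rw [e10 hlen1 k]; dsimp only; rw [c12 hlen k]
      cases st.colR[k]? with
      | none => simp
      | some a =>
        by_cases hv : row[k]? = some "R" <;>
          simp [colCnt, hv, List.countP_cons] <;> omega

theorem cntFlat (data : List (List String)) (v : String) :
    (data.flatMap (fun r => r)).count v = (data.map (fun r => r.count v)).sum := by
  induction data with
  | nil => simp
  | cons r rest ih =>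
    simp only [List.flatMap_cons, List.count_append, ih, List.map_cons, List.sum_cons]

theorem mapGetD (data : List (List String)) :
    (List.range data.length).map (fun i => data.getD i []) = data := by
  apply List.ext_getElem?
  intro i
  by_cases h : i < data.length
  · simp [List.getElem?_range, h, List.getD_eq_getElem?_getD, List.getElem?_eq_getElem h]
  · simp [List.getElem?_range, h, List.getElem?_eq_none (by omega : data.length ≤ i)]

theorem setAny (l : List String) (p : String → Bool) :
    ((PySem.Set.ofList l).any p) = l.any p := by
  rw [Bool.eq_iff_iff, List.any_eq_true, List.any_eq_true]
  constructor
  · rintro ⟨x, hx, hp⟩; exact ⟨x, (PySem.Set.mem_ofList _ _).mp hx, hp⟩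
  · rintro ⟨x, hx, hp⟩; exact ⟨x, (PySem.Set.mem_ofList _ _).mpr hx, hp⟩

theorem rowPred (v : String) (size : Int) (row : List String) (h : (row.length : Int) = size) :
    (row.all (· == v)) = ((row.count v : Int) == size) := by
  rw [Bool.eq_iff_iff, List.all_eq_true, beq_iff_eq, ← h, Int.natCast_inj]
  constructor
  · intro hall
    rw [List.count_eq_length]
    intro b hb; exact ((beq_iff_eq).mp (hall b hb)).symm
  · intro hc b hb
    exact (beq_iff_eq).mpr ((List.count_eq_length.mp hc) b hb).symm

theorem colPred (v : String) (hv : ("" : String) ≠ v) (data : List (List String)) (j : Nat) :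
    ((data.map (fun row => PySem.List.pyGetD row (j : Int) "")).all (· == v)) =
    (data.countP (fun (row : List String) => row[j]? == some v) == data.length) := by
  rw [Bool.eq_iff_iff, List.all_map, List.all_eq_true, beq_iff_eq]
  have key : ∀ row : List String,
      ((fun (x : List String) => PySem.List.pyGetD x (j : Int) "" == v) row = true) ↔
        row[j]? = some v := by
    intro row
    simp only [PySem.List.pyGetD_natCast, beq_iff_eq]
    rw [List.getD_eq_getElem?_getD]
    cases row[j]? <;> simp [hv.symm]
  constructor
  · intro hall
    rw [List.countP_eq_length]
    intro row hr; simpa using (key row).mp (hall row hr)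
  · intro hc row hr
    exact (key row).mpr (by simpa using (List.countP_eq_length.mp hc) row hr)

theorem countTrue2 (l : List Bool) (x y : Bool) :
    ((l ++ [x, y]).count true) = l.count true + (if x then 1 else 0) + (if y then 1 else 0) := by
  cases x <;> cases y <;> simp [List.count_append, List.count_cons]

theorem winsFold (data : List (List String)) : ∀ (l : List Nat) (acc : List Bool × List Bool),
    ((l.foldl (fun (acc : List Bool × List Bool) column =>
        (acc.1 ++ [(data.getD column []).all (· == "B"),
                   (data.map (fun row => PySem.List.pyGetD row (column : Int) "")).all (· == "B")],
         acc.2 ++ [(data.getD column []).all (· == "R"),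
                   (data.map (fun row => PySem.List.pyGetD row (column : Int) "")).all (· == "R")])) acc).1.count true
      = acc.1.count true + l.countP (fun c => (data.getD c []).all (· == "B"))
        + l.countP (fun (c : Nat) => (data.map (fun row => PySem.List.pyGetD row (c : Int) "")).all (· == "B"))) ∧
    ((l.foldl (fun (acc : List Bool × List Bool) column =>
        (acc.1 ++ [(data.getD column []).all (· == "B"),
                   (data.map (fun row => PySem.List.pyGetD row (column : Int) "")).all (· == "B")],
         acc.2 ++ [(data.getD column []).all (· == "R"),
                   (data.map (fun row => PySem.List.pyGetD row (column : Int) "")).all (· == "R")])) acc).2.count true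
      = acc.2.count true + l.countP (fun c => (data.getD c []).all (· == "R"))
        + l.countP (fun (c : Nat) => (data.map (fun row => PySem.List.pyGetD row (c : Int) "")).all (· == "R"))) := by
  intro l
  induction l with
  | nil => intro acc; simp
  | cons c rest ih =>
    intro acc
    rw [List.foldl_cons]
    obtain ⟨ih1, ih2⟩ := ih _
    constructor
    · rw [ih1, countTrue2, List.countP_cons, List.countP_cons]
      split_ifs <;> omega
    · rw [ih2, countTrue2, List.countP_cons, List.countP_cons]
      split_ifs <;> omega

-- ===== VERDICT (by name: the statement is the Claim_ definition above) =====
theorem process_spec : Claim_equal_process := by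
  intro data size _hdom _hpre
  unfold Spec_process
  by_cases hLen : ∀ row ∈ data, (row.length : Int) = size
  · obtain ⟨st', hrun, e1, e2, e3, e4, e5, e6, e7, e8, e9, e10⟩ :=
      hexRows_spec size data.length data hLen
        ⟨0, 0, 0, List.replicate data.length 0, List.replicate data.length 0, true, 0, 0⟩
    have hA1 : (data.any (fun row => (row.length : Int) != size)) = false := by
      simp only [List.any_eq_false]
      intro r hr
      simpa using hLen r hr
    have hok : st'.ok = data.all (fun row => row.all validCell) := by
      rw [e4]; simp
    cases hOK : data.all (fun row => row.all validCell) with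
    | false =>
      have hsetT : ((PySem.Set.ofList (data.flatMap (fun r => r))).any
          (fun c => !(VALID_INPUTS.contains c))) = true := by
        rw [setAny, List.any_eq_true]
        obtain ⟨row, hrow, hbad⟩ := List.all_eq_false.mp hOK
        have hbad' : row.all validCell = false := by simpa using hbad
        obtain ⟨c, hc, hvc⟩ := List.all_eq_false.mp hbad'
        have hvc' : ¬(c = "B" ∨ c = "R" ∨ c = ".") := by
          have h2 := hvc; simp [validCell] at h2; tauto
        refine ⟨c, List.mem_flatMap.mpr ⟨row, hrow, hc⟩, ?_⟩
        simp [VALID_INPUTS]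
        tauto
      have hokF : st'.ok = false := by rw [hok, hOK]
      simp only [process, process_alt, hA1, hsetT, hrun, hokF]
      simp
    | true =>
      have hsetF : ((PySem.Set.ofList (data.flatMap (fun r => r))).any
          (fun c => !(VALID_INPUTS.contains c))) = false := by
        rw [setAny, List.any_eq_false]
        intro c hc
        obtain ⟨row, hrow, hcrow⟩ := List.mem_flatMap.mp hc
        have hv := List.all_eq_true.mp (List.all_eq_true.mp hOK row hrow) c hcrow
        have hv' : c = "B" ∨ c = "R" ∨ c = "." := by
          have h2 := hv; simp [validCell] at h2; tauto
        simp [VALID_INPUTS]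
        tauto
      have hokT : st'.ok = true := by rw [hok, hOK]
      have hcb : st'.cb = (data.flatMap (fun r => r)).count "B" := by rw [e1, cntFlat]; simp
      have hcr : st'.cr = (data.flatMap (fun r => r)).count "R" := by rw [e2, cntFlat]; simp
      have hcd : st'.cd = (data.flatMap (fun r => r)).count "." := by rw [e3, cntFlat]; simp
      have hcolB : st'.colB = (List.range data.length).map
          (fun k => data.countP (fun (row : List String) => row[k]? == some "B")) := by
        apply List.ext_getElem?
        intro k
        rw [e9 (by simp) k]
        by_cases hk : k < data.length <;>
          simp [List.getElem?_replicate, List.getElem?_range, hk]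
      have hcolR : st'.colR = (List.range data.length).map
          (fun k => data.countP (fun (row : List String) => row[k]? == some "R")) := by
        apply List.ext_getElem?
        intro k
        rw [e10 (by simp) k]
        by_cases hk : k < data.length <;>
          simp [List.getElem?_replicate, List.getElem?_range, hk]
      have t1 : ∀ v : String, (List.range data.length).countP (fun c => (data.getD c []).all (· == v))
          = List.countP (fun row => ((row.count v : Int) == size)) data := by
        intro v
        have h0 := congrArg (List.countP (fun row => row.all (· == v))) (mapGetD data)
        rw [List.countP_map] at h0
        rw [show ((fun (row : List String) => row.all (· == v)) ∘ fun i => data.getD i [])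
              = fun c => (data.getD c []).all (· == v) from rfl] at h0
        rw [h0]
        exact List.countP_congr (fun row hrow => by rw [rowPred v size row (hLen row hrow)])
      have t2 : ∀ v : String, ("" : String) ≠ v →
          (List.range data.length).countP
            (fun (c : Nat) => (data.map (fun row => PySem.List.pyGetD row (c : Int) "")).all (· == v))
          = ((List.range data.length).map
              (fun k => data.countP (fun (row : List String) => row[k]? == some v))).count data.length := by
        intro v hv
        rw [List.count_eq_countP, List.countP_map]
        exact List.countP_congr (fun j hj => by rw [colPred v hv data j]; rfl)
      have hbw : st'.bw + st'.colB.count data.length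
          = (List.range data.length).countP (fun c => (data.getD c []).all (· == "B"))
            + (List.range data.length).countP
                (fun (c : Nat) => (data.map (fun row => PySem.List.pyGetD row (c : Int) "")).all (· == "B")) := by
        rw [e5, hcolB, t1, t2 "B" (by decide)]
        simp
      have hrw : st'.rw + st'.colR.count data.length
          = (List.range data.length).countP (fun c => (data.getD c []).all (· == "R"))
            + (List.range data.length).countP
                (fun (c : Nat) => (data.map (fun row => PySem.List.pyGetD row (c : Int) "")).all (· == "R")) := by
        rw [e6, hcolR, t1, t2 "R" (by decide)]
        simp
      obtain ⟨wB, wR⟩ := winsFold data (List.range data.length) ([], [])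
      simp only [List.count_nil, Nat.zero_add] at wB wR
      simp only [process, process_alt, hA1, hsetF, hrun, hokT, hcb, hcr, hcd,
        Bool.false_eq_true, if_false, wB, wR, hbw, hrw]
      simp
  · push_neg at hLen
    have hA : (data.any (fun row => (row.length : Int) != size)) = true := by
      rw [List.any_eq_true]
      obtain ⟨r, hr, hne⟩ := hLen
      exact ⟨r, hr, by simpa using hne⟩
    have hB := hexRows_none size data.length data
      ⟨0, 0, 0, List.replicate data.length 0, List.replicate data.length 0, true, 0, 0⟩ hLen
    simp only [process, process_alt, hA, hB]
    simp
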